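-- pv_equiv track=rewrite | github.com/tomo-playground/sdd-orchestrator | backend/services/agent/cinematographer_competition.py | _extract_scene_features
-- ===== SOURCE A (Python) =====
-- _LIGHTING_TAGS = frozenset({"backlighting", "sunlight", "moonlight", "sidelighting", "light_rays", "golden_hour"})
--
-- _TECHNIQUE_TAGS = frozenset(
--     {"depth_of_field", "bokeh", "silhouette", "lens_flare", "chromatic_aberration", "motion_blur"}
-- )
--
-- def _extract_scene_features(scenes: list[dict]) -> tuple[set[str], list[str], int, int, set[str]]:
--     """씬 리스트에서 스코어링에 필요한 피처를 추출한다.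
--
--     Returns:
--         (all_tags, cameras, lat_count, lighting_scenes, all_techniques)
--     """
--     all_tags: set[str] = set()
--     cameras: list[str] = []
--     lat_count = 0
--     lighting_scenes = 0
--     all_techniques: set[str] = set()
--
--     for s in scenes:
--         prompt = s.get("image_prompt", "")
--         tags = {t.strip() for t in prompt.split(",") if t.strip()}
--         all_tags.update(tags)
--         cameras.append(s.get("camera", ""))
--
--         if "looking_at_viewer" in tags:
--             lat_count += 1
--         if tags & _LIGHTING_TAGS:
--             lighting_scenes += 1
--         all_techniques.update(tags & _TECHNIQUE_TAGS)
--
--     return all_tags, cameras, lat_count, lighting_scenes, all_techniques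
-- ===== SOURCE B (Python) =====
-- _LIGHTING_TAGS = frozenset({"backlighting", "sunlight", "moonlight", "sidelighting", "light_rays", "golden_hour"})
--
-- _TECHNIQUE_TAGS = frozenset(
--     {"depth_of_field", "bokeh", "silhouette", "lens_flare", "chromatic_aberration", "motion_blur"}
-- )
--
-- def _extract_scene_features(scenes):
--     """Flatten the scenes into one (scene_index, tag) token stream, then read every
--     feature off that stream: per-scene counts become distinct-index counts."""
--     cameras = [s.get("camera", "") for s in scenes]
--     stream = [
--         (i, t.strip())
--         for i, s in enumerate(scenes)
--         for t in s.get("image_prompt", "").split(",")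
--         if t.strip()
--     ]
--     all_tags = {t for _, t in stream}
--     all_techniques = {t for _, t in stream if t in _TECHNIQUE_TAGS}
--     lat_count = len({i for i, t in stream if t == "looking_at_viewer"})
--     lighting_scenes = len({i for i, t in stream if t in _LIGHTING_TAGS})
--     return all_tags, cameras, lat_count, lighting_scenes, all_techniques
-- ===== Notes on version B (the rewrite author's own statement) =====
-- stated objective: alternative
-- what changed: Instead of A's per-scene loop over five accumulators, B flattens the scenes into a single (scene_index, stripped_tag) token stream and reads every feature off that stream: the tag sets by deduplicating token projections, and the per-scene counts as counts of DISTINCT scene indices carrying a matching token.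
import Mathlib
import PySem

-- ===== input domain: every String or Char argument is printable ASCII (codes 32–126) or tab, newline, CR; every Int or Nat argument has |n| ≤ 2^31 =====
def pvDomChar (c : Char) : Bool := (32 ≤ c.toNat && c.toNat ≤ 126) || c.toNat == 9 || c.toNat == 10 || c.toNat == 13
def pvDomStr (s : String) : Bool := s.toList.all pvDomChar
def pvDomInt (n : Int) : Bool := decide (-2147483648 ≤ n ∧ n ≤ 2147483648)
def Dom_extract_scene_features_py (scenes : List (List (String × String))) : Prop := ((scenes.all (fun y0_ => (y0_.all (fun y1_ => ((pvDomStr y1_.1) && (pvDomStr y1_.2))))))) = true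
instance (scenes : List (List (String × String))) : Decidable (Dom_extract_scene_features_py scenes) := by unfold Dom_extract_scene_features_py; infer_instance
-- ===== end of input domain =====

-- B flattens the scenes into one (scene_index, tag) token stream and reads each feature off
-- that stream (per-scene counts become distinct-index counts) — an alternative decomposition, same cost.

-- shared module constants
def pvLightingTags : PySem.Set String :=
  PySem.Set.ofList ["backlighting", "sunlight", "moonlight", "sidelighting", "light_rays", "golden_hour"]

def pvTechniqueTags : PySem.Set String :=
  PySem.Set.ofList ["depth_of_field", "bokeh", "silhouette", "lens_flare", "chromatic_aberration", "motion_blur"]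

-- the cleaned-token expression both Pythons contain verbatim: [t.strip() for t in prompt.split(",") if t.strip()]
def pvToks (prompt : String) : List String :=
  (PySem.Chars.splitOn prompt.toList [',']).filterMap
    (fun t => let u := PySem.Chars.strip t; if u = [] then none else some (String.ofList u))

-- ===== PORT A =====
-- {t.strip() for t in prompt.split(",") if t.strip()}
def pvCleanTags (prompt : String) : PySem.Set String :=
  PySem.Set.ofList (pvToks prompt)

def extract_scene_features_py (scenes : List (List (String × String))) : List String × List String × Int × Int × List String :=
  scenes.foldl
    (fun st s =>
      let prompt := (PySem.Dict.mk s).getD "image_prompt" ""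
      let tags := pvCleanTags prompt
      let allTags := PySem.Set.update st.1 tags
      let cameras := st.2.1 ++ [(PySem.Dict.mk s).getD "camera" ""]
      let lat := if PySem.Set.contains tags "looking_at_viewer" then st.2.2.1 + 1 else st.2.2.1
      let light := if !(PySem.Set.inter tags pvLightingTags).isEmpty then st.2.2.2.1 + 1 else st.2.2.2.1
      let tech := PySem.Set.update st.2.2.2.2 (PySem.Set.inter tags pvTechniqueTags)
      (allTags, cameras, lat, light, tech))
    (PySem.Set.empty, [], 0, 0, PySem.Set.empty)

-- ===== PORT B =====
-- enumerate(scenes) starting at n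
def pvEnum {α : Type} (n : Nat) : List α → List (Nat × α)
  | [] => []
  | x :: xs => (n, x) :: pvEnum (n + 1) xs

-- [(i, t.strip()) for i, s in enumerate-from-n for t in s.get("image_prompt","").split(",") if t.strip()]
def pvStream (n : Nat) (scenes : List (List (String × String))) : List (Nat × String) :=
  (pvEnum n scenes).flatMap
    (fun is => (pvToks ((PySem.Dict.mk is.2).getD "image_prompt" "")).map (fun t => (is.1, t)))

def extract_scene_features_py_alt (scenes : List (List (String × String))) : List String × List String × Int × Int × List String :=
  let cameras := scenes.map (fun s => (PySem.Dict.mk s).getD "camera" "")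
  let stream := pvStream 0 scenes
  let allTags := PySem.Set.ofList (stream.map (fun it => it.2))
  let allTechniques := PySem.Set.ofList ((stream.filter (fun it => pvTechniqueTags.contains it.2)).map (fun it => it.2))
  let latCount : Int := ((PySem.Set.ofList ((stream.filter (fun it => it.2 == "looking_at_viewer")).map (fun it => it.1))).length : Nat)
  let lightingScenes : Int := ((PySem.Set.ofList ((stream.filter (fun it => pvLightingTags.contains it.2)).map (fun it => it.1))).length : Nat)
  (allTags, cameras, latCount, lightingScenes, allTechniques)

-- ===== PRECONDITION & SPEC =====
def Spec_extract_scene_features_py (scenes : List (List (String × String))) (out : List String × List String × Int × Int × List String) : Prop := out = extract_scene_features_py_alt scenes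
instance (scenes : List (List (String × String))) (out : List String × List String × Int × Int × List String) : Decidable (Spec_extract_scene_features_py scenes out) := by unfold Spec_extract_scene_features_py; infer_instance

-- ===== CLAIM (what is proved, stated in full; the proofs are below) =====
def Claim_equal_extract_scene_features_py : Prop := ∀ (scenes : List (List (String × String))), Dom_extract_scene_features_py scenes → Spec_extract_scene_features_py scenes (extract_scene_features_py scenes)

-- ===== LEMMAS AND PROOFS =====

-- per-scene token list of scene s
def pvT (s : List (String × String)) : List String :=
  pvToks ((PySem.Dict.mk s).getD "image_prompt" "")

lemma pvStream_cons (n : Nat) (s : List (String × String)) (rest : List (List (String × String))) :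
    pvStream n (s :: rest) = (pvT s).map (fun t => (n, t)) ++ pvStream (n + 1) rest := by
  simp [pvStream, pvEnum, pvT]

-- A's accumulating loop, characterised component-wise
lemma pv_fold_eq (scenes : List (List (String × String)))
    (a : PySem.Set String) (c : List String) (l g : Int) (t : PySem.Set String) :
    scenes.foldl
      (fun st s =>
        let prompt := (PySem.Dict.mk s).getD "image_prompt" ""
        let tags := pvCleanTags prompt
        let allTags := PySem.Set.update st.1 tags
        let cameras := st.2.1 ++ [(PySem.Dict.mk s).getD "camera" ""]
        let lat := if PySem.Set.contains tags "looking_at_viewer" then st.2.2.1 + 1 else st.2.2.1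
        let light := if !(PySem.Set.inter tags pvLightingTags).isEmpty then st.2.2.2.1 + 1 else st.2.2.2.1
        let tech := PySem.Set.update st.2.2.2.2 (PySem.Set.inter tags pvTechniqueTags)
        ((allTags, cameras, lat, light, tech) : List String × List String × Int × Int × List String))
      (a, c, l, g, t)
    = ((scenes.map (fun s => pvCleanTags ((PySem.Dict.mk s).getD "image_prompt" ""))).foldl PySem.Set.union a,
       c ++ scenes.map (fun s => (PySem.Dict.mk s).getD "camera" ""),
       l + ((scenes.map (fun s => pvCleanTags ((PySem.Dict.mk s).getD "image_prompt" ""))).countP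
              (fun ts => PySem.Set.contains ts "looking_at_viewer") : Nat),
       g + ((scenes.map (fun s => pvCleanTags ((PySem.Dict.mk s).getD "image_prompt" ""))).countP
              (fun ts => !(PySem.Set.inter ts pvLightingTags).isEmpty) : Nat),
       ((scenes.map (fun s => pvCleanTags ((PySem.Dict.mk s).getD "image_prompt" ""))).map
          (fun ts => PySem.Set.inter ts pvTechniqueTags)).foldl PySem.Set.union t) := by
  induction scenes generalizing a c l g t with
  | nil => simp
  | cons s rest ih =>
      simp only [List.foldl_cons, List.map_cons, List.countP_cons, ih]
      refine Prod.ext ?_ (Prod.ext ?_ (Prod.ext ?_ (Prod.ext ?_ ?_))) <;> simp [PySem.Set.union]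
      · split_ifs <;> ring
      · split_ifs <;> ring

-- updating with a set is updating with the underlying list
lemma pv_update_ofList {α : Type} [BEq α] [LawfulBEq α] (s : PySem.Set α) (l : List α) :
    PySem.Set.update s (PySem.Set.ofList l) = PySem.Set.update s l := by
  rw [PySem.Set.update_eq_append_filter, PySem.Set.update_eq_append_filter, PySem.Set.ofList_ofList]

-- folding union over per-list sets is one big update
lemma pv_foldl_union (ls : List (List String)) (a : PySem.Set String) :
    (ls.map PySem.Set.ofList).foldl PySem.Set.union a = PySem.Set.update a ls.flatten := by
  induction ls generalizing a with
  | nil => simp [PySem.Set.update]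
  | cons l rest ih =>
      simp only [List.map_cons, List.foldl_cons, List.flatten_cons]
      rw [show PySem.Set.union a (PySem.Set.ofList l) = PySem.Set.update a (PySem.Set.ofList l) from rfl,
          pv_update_ofList, ih, ← PySem.Set.update_append]

-- dedup commutes with filter
lemma pv_filter_comm {α : Type} (q p : α → Bool) (S : List α) :
    (S.filter q).filter p = (S.filter p).filter q := by
  simp only [List.filter_filter]
  exact List.filter_congr (fun y _ => by rw [Bool.and_comm])

lemma pv_filter_ofList {α : Type} [BEq α] [LawfulBEq α] (q : α → Bool) (l : List α) :
    (PySem.Set.ofList l).filter q = PySem.Set.ofList (l.filter q) := by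
  induction l with
  | nil => rfl
  | cons x l ih =>
      rw [PySem.Set.ofList_cons, List.filter_cons]
      by_cases hq : q x = true
      · simp only [hq, if_pos, List.filter_cons_of_pos hq, PySem.Set.ofList_cons]
        congr 1
        show ((PySem.Set.ofList l).filter (fun y => !(y == x))).filter q
             = (PySem.Set.ofList (l.filter q)).filter (fun y => !(y == x))
        rw [pv_filter_comm, ih]
      · simp only [hq, List.filter_cons_of_neg hq]
        show ((PySem.Set.ofList l).filter (fun y => !(y == x))).filter q
             = PySem.Set.ofList (l.filter q)
        rw [pv_filter_comm, ih]
        refine List.filter_eq_self.mpr (fun y hy => ?_)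
        have hyq : q y = true := (List.mem_filter.mp ((PySem.Set.mem_ofList _ _).mp hy)).2
        simp only [Bool.not_eq_eq_eq_not, Bool.not_true, beq_eq_false_iff_ne]
        rintro rfl; exact hq hyq

-- intersection of a set built from l with t is the set of l's t-members
lemma pv_inter_ofList (l : List String) (t : PySem.Set String) :
    PySem.Set.inter (PySem.Set.ofList l) t = PySem.Set.ofList (l.filter (fun y => t.contains y)) := by
  rw [show PySem.Set.inter (PySem.Set.ofList l) t = (PySem.Set.ofList l).filter (fun y => t.contains y) from rfl]
  exact pv_filter_ofList _ l

-- the filtered stream, blockwise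
lemma pv_stream_filter (p : String → Bool) (scenes : List (List (String × String))) :
    ∀ n, (pvStream n scenes).filter (fun it => p it.2)
      = (pvEnum n scenes).flatMap (fun is => ((pvT is.2).filter p).map (fun t => (is.1, t))) := by
  induction scenes with
  | nil => intro n; rfl
  | cons s rest ih =>
      intro n
      rw [pvStream_cons, List.filter_append, ih]
      simp [pvEnum, List.filter_map, Function.comp_def]

lemma pv_stream_map_snd (scenes : List (List (String × String))) :
    ∀ n, (pvStream n scenes).map (fun it => it.2) = scenes.flatMap pvT := by
  induction scenes with
  | nil => intro n; rfl
  | cons s rest ih =>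
      intro n
      rw [pvStream_cons, List.map_append, ih]
      simp [List.map_map, Function.comp_def]

lemma pv_stream_filter_snd (p : String → Bool) (scenes : List (List (String × String))) (n : Nat) :
    ((pvStream n scenes).filter (fun it => p it.2)).map (fun it => it.2)
      = scenes.flatMap (fun s => (pvT s).filter p) := by
  rw [pv_stream_filter]
  induction scenes generalizing n with
  | nil => rfl
  | cons s rest ih => simp [pvEnum, List.map_map, Function.comp_def, ih]

lemma pv_stream_filter_fst (p : String → Bool) (scenes : List (List (String × String))) (n : Nat) :
    ((pvStream n scenes).filter (fun it => p it.2)).map (fun it => it.1)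
      = (pvEnum n scenes).flatMap (fun is => ((pvT is.2).filter p).map (fun _ => is.1)) := by
  rw [pv_stream_filter]
  induction scenes generalizing n with
  | nil => rfl
  | cons s rest ih => simp [pvEnum, List.map_map, Function.comp_def, ih]

-- every index in the tail of the enumeration is at least the start index
lemma pv_enum_blocks_ge (g : List (String × String) → List String) (scenes : List (List (String × String))) :
    ∀ m x, x ∈ (pvEnum m scenes).flatMap (fun is => (g is.2).map (fun _ => is.1)) → m ≤ x := by
  induction scenes with
  | nil => intro m x h; simp [pvEnum] at h
  | cons s rest ih =>
      intro m x h
      simp only [pvEnum, List.flatMap_cons, List.mem_append] at h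
      rcases h with h | h
      · rcases List.mem_map.mp h with ⟨_, _, rfl⟩
        exact Nat.le_refl _
      · exact Nat.le_of_succ_le (ih (m + 1) x h)

lemma pv_ofList_const_append (blk ys : List Nat) (n : Nat) (hb : ∀ x ∈ blk, x = n) (hn : n ∉ ys) :
    PySem.Set.ofList (blk ++ ys) = if blk.isEmpty then PySem.Set.ofList ys else n :: PySem.Set.ofList ys := by
  have hys : ∀ y ∈ PySem.Set.ofList ys, (!(y == n)) = true := by
    intro y hy
    have : y ∈ ys := (PySem.Set.mem_ofList _ _).mp hy
    simp only [Bool.not_eq_eq_eq_not, Bool.not_true, beq_eq_false_iff_ne]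
    rintro rfl; exact hn this
  induction blk with
  | nil => simp
  | cons x blk ihb =>
      have hx : x = n := hb x (List.mem_cons_self ..)
      subst hx
      rw [List.cons_append, PySem.Set.ofList_cons,
          ihb (fun y hy => hb y (List.mem_cons_of_mem _ hy))]
      by_cases he : blk.isEmpty
      · simp only [he, if_pos, List.isEmpty_cons, if_neg Bool.false_ne_true]
        show x :: (PySem.Set.ofList ys).filter (fun y => !(y == x)) = x :: PySem.Set.ofList ys
        rw [List.filter_eq_self.mpr hys]
      · simp only [he, List.isEmpty_cons, if_neg Bool.false_ne_true]
        show x :: (x :: PySem.Set.ofList ys).filter (fun y => !(y == x)) = x :: PySem.Set.ofList ys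
        rw [List.filter_cons_of_neg (by simp), List.filter_eq_self.mpr hys]

-- distinct-index count over constant blocks = per-scene count
lemma pv_count_blocks (g : List (String × String) → List String) (scenes : List (List (String × String))) :
    ∀ n, (PySem.Set.ofList ((pvEnum n scenes).flatMap (fun is => (g is.2).map (fun _ => is.1)))).length
      = scenes.countP (fun s => !(g s).isEmpty) := by
  induction scenes with
  | nil => intro n; rfl
  | cons s rest ih =>
      intro n
      simp only [pvEnum, List.flatMap_cons]
      rw [pv_ofList_const_append ((g s).map (fun _ => n)) _ n
            (fun x hx => by rcases List.mem_map.mp hx with ⟨_, _, rfl⟩; rfl)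
            (fun h => by have := pv_enum_blocks_ge g rest (n + 1) n h; omega)]
      by_cases he : (g s).isEmpty
      · rw [if_pos (by simpa using he), List.countP_cons, ih (n + 1)]
        simp [he]
      · rw [if_neg (by simpa using he), List.length_cons, List.countP_cons, ih (n + 1)]
        simp [he]

lemma pv_isEmpty_ofList {α : Type} [BEq α] [LawfulBEq α] (l : List α) :
    (PySem.Set.ofList l).isEmpty = l.isEmpty := by
  cases l with
  | nil => rfl
  | cons x l => rw [PySem.Set.ofList_cons]; rfl

lemma pv_contains_eq_filter (L : List String) (x : String) :
    PySem.Set.contains (PySem.Set.ofList L) x = !(L.filter (fun t => t == x)).isEmpty := by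
  by_cases h : x ∈ L
  · have h1 : PySem.Set.contains (PySem.Set.ofList L) x = true :=
      (PySem.Set.contains_iff _ _).mpr ((PySem.Set.mem_ofList _ _).mpr h)
    have h2 : x ∈ L.filter (fun t => t == x) := List.mem_filter.mpr ⟨h, by simp⟩
    rw [h1, eq_comm, Bool.not_eq_eq_eq_not, Bool.not_true, List.isEmpty_eq_false_iff_exists_mem]
    exact ⟨x, h2⟩
  · have h1 : PySem.Set.contains (PySem.Set.ofList L) x = false :=
      Bool.eq_false_iff.mpr
        (fun hc => h ((PySem.Set.mem_ofList _ _).mp ((PySem.Set.contains_iff _ _).mp hc)))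
    have h2 : L.filter (fun t => t == x) = [] :=
      List.filter_eq_nil_iff.mpr (fun t ht hq => h (by rwa [← eq_of_beq hq]))
    rw [h1, h2]; rfl

lemma pv_countP_sets (P : PySem.Set String → Bool) (Q : List (String × String) → Bool)
    (h : ∀ s, P (PySem.Set.ofList (pvT s)) = Q s) (scenes : List (List (String × String))) :
    (scenes.map (fun s => PySem.Set.ofList (pvT s))).countP P = scenes.countP Q := by
  induction scenes with
  | nil => rfl
  | cons s rest ih => simp [List.countP_cons, h, ih]

-- ===== VERDICT (by name: the statement is the Claim_ definition above) =====
theorem extract_scene_features_py_spec : Claim_equal_extract_scene_features_py := by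
  intro scenes _
  unfold Spec_extract_scene_features_py extract_scene_features_py extract_scene_features_py_alt
  rw [pv_fold_eq]
  rw [show (fun s : List (String × String) => pvCleanTags ((PySem.Dict.mk s).getD "image_prompt" ""))
        = fun s => PySem.Set.ofList (pvT s) from rfl]
  dsimp only
  simp only [Prod.mk.injEq]
  refine ⟨?_, ?_, ?_, ?_, ?_⟩
  · -- all_tags
    rw [pv_stream_map_snd scenes 0,
        show scenes.map (fun s => PySem.Set.ofList (pvT s)) = (scenes.map pvT).map PySem.Set.ofList from
          (List.map_map ..).symm,
        pv_foldl_union]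
    rfl
  · -- cameras
    simp
  · -- lat_count
    rw [pv_stream_filter_fst (fun t => t == "looking_at_viewer") scenes 0,
        pv_count_blocks (fun s => (pvT s).filter (fun t => t == "looking_at_viewer")) scenes 0]
    rw [zero_add, pv_countP_sets (fun ts => ts.contains "looking_at_viewer")
          (fun s => !((pvT s).filter (fun t => t == "looking_at_viewer")).isEmpty)
          (fun s => pv_contains_eq_filter (pvT s) "looking_at_viewer") scenes]
  · -- lighting_scenes
    rw [pv_stream_filter_fst (fun t => pvLightingTags.contains t) scenes 0,
        pv_count_blocks (fun s => (pvT s).filter (fun t => pvLightingTags.contains t)) scenes 0]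
    rw [zero_add, pv_countP_sets (fun ts => !(PySem.Set.inter ts pvLightingTags).isEmpty)
          (fun s => !((pvT s).filter (fun t => pvLightingTags.contains t)).isEmpty)
          (fun s => by simp only []; rw [pv_inter_ofList, pv_isEmpty_ofList]) scenes]
  · -- all_techniques
    rw [pv_stream_filter_snd (fun t => pvTechniqueTags.contains t) scenes 0]
    rw [show (scenes.map (fun s => PySem.Set.ofList (pvT s))).map (fun ts => PySem.Set.inter ts pvTechniqueTags)
          = (scenes.map (fun s => (pvT s).filter (fun y => pvTechniqueTags.contains y))).map PySem.Set.ofList from by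
        simp only [List.map_map, Function.comp_def, pv_inter_ofList],
        pv_foldl_union]
    rfl
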